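-- pv_equiv track=rewrite | github.com/george-poole/LUCiFEx | lucifex/viz/utils.py | detexify
-- ===== SOURCE A (Python) =====
-- TEX_SYMBOLS = (
--         # lower case Greek
--         "alpha",
--         "beta",
--         "gamma",
--         "delta",
--         'epsilon',
--         'zeta',
--         'eta',
--         'theta',
--         'iota',
--         'kappa',
--         'lambda',
--         'mu',
--         'nu',
--         'xi',
--         'pi',
--         'rho',
--         'sigma',
--         'tau',
--         'upsilon',
--         'phi',
--         'chi',
--         'psi',
--         'omega',
--         # upper case Greek
--         'Gamma',
--         'Delta',
--         'Theta',
--         'Lambda',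
--         'Xi',
--         'Pi',
--         'Sigma',
--         'Upsilon',
--         'Phi',
--         'Psi',
--         'Omega',
--         # mathematical operations
--         "times",
--         "cdot",
--     )
--
-- def detexify(
--     label: str | None,
--     strip_wspace: bool = True,
-- ) -> str:
--     if label == "" or label is None:
--         return ""
--     if label[0] == '$' and label[-1] == '$':
--         return detexify(label[1:-1])
--
--     for i in TEX_SYMBOLS:
--         if f'\\{i}' in label:
--             label = label.replace(f'\\{i}', 'i')
--
--     if strip_wspace:
--         label = label.replace(' ', '')
--
--     return label
-- ===== SOURCE B (Python) =====
-- TEX_SYMBOLS = (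
--     "alpha", "beta", "gamma", "delta", 'epsilon', 'zeta', 'eta', 'theta',
--     'iota', 'kappa', 'lambda', 'mu', 'nu', 'xi', 'pi', 'rho', 'sigma',
--     'tau', 'upsilon', 'phi', 'chi', 'psi', 'omega',
--     'Gamma', 'Delta', 'Theta', 'Lambda', 'Xi', 'Pi', 'Sigma', 'Upsilon',
--     'Phi', 'Psi', 'Omega',
--     "times", "cdot",
-- )
--
--
-- def _sub_once(s, pat):
--     # one left-to-right scan replacing non-overlapping occurrences of pat by 'i'
--     out = []
--     i = 0
--     m = len(pat)
--     while i < len(s):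
--         if s[i:i + m] == pat:
--             out.append('i')
--             i += m
--         else:
--             out.append(s[i])
--             i += 1
--     return ''.join(out)
--
--
-- def detexify(label, strip_wspace=True):
--     if not label:
--         return ""
--     while label.startswith('$') and label.endswith('$'):
--         label = label[1:-1]
--     for sym in TEX_SYMBOLS:
--         label = _sub_once(label, '\\' + sym)
--     if strip_wspace:
--         label = label.replace(' ', '')
--     return label
-- ===== Notes on version B (the rewrite author's own statement) =====
-- stated objective: alternative
-- what changed: The $-peeling recursion becomes an iterative while loop that keeps the caller's strip_wspace flag, and each guarded str.replace pass becomes an explicit hand-rolled left-to-right scan; the 37 per-symbol sequential passes are kept because later passes may consume text created by earlier replacements (e.g. '\ch\pi' -> 'i').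
-- intended difference: On labels wrapped in '$...$' whose contents contain a space and called with strip_wspace=False, A strips the spaces anyway because its recursive call silently resets strip_wspace to the default True, while B honours the caller's strip_wspace=False and keeps the spaces, which is the intended meaning of the flag. — e.g. on detexify(some "$ a$", false): A returns "a", B returns " a"
import Mathlib
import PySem

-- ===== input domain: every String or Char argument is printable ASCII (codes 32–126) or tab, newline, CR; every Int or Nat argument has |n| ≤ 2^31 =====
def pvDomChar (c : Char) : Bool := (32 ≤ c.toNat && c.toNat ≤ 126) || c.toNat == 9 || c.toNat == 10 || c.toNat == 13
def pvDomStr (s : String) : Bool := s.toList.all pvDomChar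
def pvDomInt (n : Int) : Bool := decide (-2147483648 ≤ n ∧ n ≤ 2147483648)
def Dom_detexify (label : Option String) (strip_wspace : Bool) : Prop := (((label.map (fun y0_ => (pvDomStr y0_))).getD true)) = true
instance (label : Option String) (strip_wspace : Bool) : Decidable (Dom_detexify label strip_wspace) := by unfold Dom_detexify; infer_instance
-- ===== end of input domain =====

-- B replaces A's $-peeling recursion by an iterative loop that keeps the caller's
-- strip_wspace flag (A's recursive call silently resets it to True — stated as the
-- intended difference D_ below), and each guarded str.replace pass by an explicit
-- hand-rolled left-to-right scan. Same cost.

-- shared constant: the module-level tuple TEX_SYMBOLS (as lists of characters)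
def TEX_SYMBOLS : List (List Char) :=
  ["alpha".toList, "beta".toList, "gamma".toList, "delta".toList, "epsilon".toList,
   "zeta".toList, "eta".toList, "theta".toList, "iota".toList, "kappa".toList,
   "lambda".toList, "mu".toList, "nu".toList, "xi".toList, "pi".toList, "rho".toList,
   "sigma".toList, "tau".toList, "upsilon".toList, "phi".toList, "chi".toList,
   "psi".toList, "omega".toList,
   "Gamma".toList, "Delta".toList, "Theta".toList, "Lambda".toList, "Xi".toList,
   "Pi".toList, "Sigma".toList, "Upsilon".toList, "Phi".toList, "Psi".toList,
   "Omega".toList,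
   "times".toList, "cdot".toList]

-- ===== PORT A =====
-- termination helper for detexifyGo (label[1:-1] is strictly shorter)
theorem pv_slice_one_negone_length_lt (l : List Char) (h : l ≠ []) :
    (PySem.List.slice l (some 1) (some (-1))).length < l.length := by
  cases l with
  | nil => exact absurd rfl h
  | cons c t =>
    simp [PySem.List.slice, PySem.List.clampIdx]

-- the recursive body of A (over the characters of a non-None label)
def detexifyGo (l : List Char) (strip_wspace : Bool) : List Char :=
  if l = [] then []                                           -- 'if label == "" … return ""' of the recursive call
  else if PySem.List.pyGet? l 0 = some '$' ∧ PySem.List.pyGet? l (-1) = some '$' then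
    detexifyGo (PySem.List.slice l (some 1) (some (-1))) true -- detexify(label[1:-1]) with the default strip_wspace=True
  else
    let l2 := TEX_SYMBOLS.foldl (fun lab i =>
      if PySem.Chars.isIn ('\\' :: i) lab then PySem.Chars.replace lab ('\\' :: i) ['i'] else lab) l
    if strip_wspace then PySem.Chars.replace l2 [' '] [] else l2
termination_by l.length
decreasing_by exact pv_slice_one_negone_length_lt l (by assumption)

def detexify (label : Option String) (strip_wspace : Bool) : String :=
  match label with
  | none => ""                                                -- 'label is None'
  | some s => if s.toList = [] then ""                        -- 'label == ""'
              else String.ofList (detexifyGo s.toList strip_wspace)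

-- ===== PORT B =====
-- B's while loop: peel balanced outer '$' characters
def peelB (l : List Char) : List Char :=
  if l.head? = some '$' ∧ l.getLast? = some '$' then
    peelB (l.drop 1).dropLast                                 -- label = label[1:-1]
  else l
termination_by l.length
decreasing_by
  rename_i h
  cases l with
  | nil => simp at h
  | cons c t => simp

-- B's _sub_once: one left-to-right scan replacing non-overlapping occurrences of (p :: pt) by 'i'
def subOnce (p : Char) (pt : List Char) : List Char → List Char
  | [] => []
  | c :: rest =>
      if (c :: rest).take (pt.length + 1) = p :: pt then
        'i' :: subOnce p pt ((c :: rest).drop (pt.length + 1))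
      else c :: subOnce p pt rest
termination_by l => l.length
decreasing_by
  · simp [List.length_drop]
  · simp

def detexify_alt (label : Option String) (strip_wspace : Bool) : String :=
  match label with
  | none => ""                                                -- 'if not label'
  | some s =>
    if s.toList = [] then "" else
    let l := peelB s.toList
    let l2 := TEX_SYMBOLS.foldl (fun cs sym => subOnce '\\' sym cs) l
    String.ofList (if strip_wspace then PySem.Chars.replace l2 [' '] [] else l2)

-- ===== PRECONDITION & SPEC =====
-- On labels wrapped in '$...$' whose contents contain a space and strip_wspace=False,
-- A strips the spaces anyway (its recursive call silently resets strip_wspace to the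
-- default True), while B honours the caller's strip_wspace=False and keeps them,
-- which is the intended meaning of the flag.
def D_detexify (label : Option String) (strip_wspace : Bool) : Prop :=
  strip_wspace = false ∧
    (label.elim false (fun s =>
      (s.toList.head? == some '$') && (s.toList.getLast? == some '$') && s.toList.contains ' ')) = true
instance (label : Option String) (strip_wspace : Bool) : Decidable (D_detexify label strip_wspace) := by
  unfold D_detexify; infer_instance

def Spec_detexify (label : Option String) (strip_wspace : Bool) (out : String) : Prop :=
  ¬ D_detexify label strip_wspace → out = detexify_alt label strip_wspace
instance (label : Option String) (strip_wspace : Bool) (out : String) : Decidable (Spec_detexify label strip_wspace out) := by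
  unfold Spec_detexify; infer_instance

def pvDiffWitness_detexify : Option String × Bool := (some "$ a$", false)
def pvDiffWitnessOut_detexify : String × String := ("a", " a")

-- ===== CLAIM (what is proved, stated in full; the proofs are below) =====
def Claim_unchanged_detexify : Prop := ∀ (label : Option String) (strip_wspace : Bool), Dom_detexify label strip_wspace → Spec_detexify label strip_wspace (detexify label strip_wspace)
def Claim_changed_detexify : Prop := Dom_detexify (pvDiffWitness_detexify.1) (pvDiffWitness_detexify.2) ∧ D_detexify (pvDiffWitness_detexify.1) (pvDiffWitness_detexify.2) ∧ detexify (pvDiffWitness_detexify.1) (pvDiffWitness_detexify.2) = pvDiffWitnessOut_detexify.1 ∧ detexify_alt (pvDiffWitness_detexify.1) (pvDiffWitness_detexify.2) = pvDiffWitnessOut_detexify.2 ∧ pvDiffWitnessOut_detexify.1 ≠ pvDiffWitnessOut_detexify.2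
def Claim_exact_detexify : Prop := ∀ (label : Option String) (strip_wspace : Bool), Dom_detexify label strip_wspace → D_detexify label strip_wspace → detexify label strip_wspace ≠ detexify_alt label strip_wspace

-- ===== LEMMAS AND PROOFS =====

-- reference recursion: replace every non-overlapping occurrence of (o :: ot) by new, left to right
def replRec (o : Char) (ot : List Char) (new : List Char) : List Char → List Char
  | [] => []
  | c :: rest =>
      if (o :: ot).isPrefixOf (c :: rest) then new ++ replRec o ot new (rest.drop ot.length)
      else c :: replRec o ot new rest
termination_by l => l.length
decreasing_by
  · simp [List.length_drop]
  · simp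

theorem go_eq (o : Char) (ot new : List Char) :
    ∀ fuel (l acc : List Char), l.length ≤ fuel →
      PySem.Chars.replace.go (o :: ot) new fuel l acc = acc.reverse ++ replRec o ot new l := by
  intro fuel
  induction fuel with
  | zero =>
    intro l acc h
    have : l = [] := by cases l <;> simp_all
    subst this
    simp [PySem.Chars.replace.go, replRec]
  | succ n ih =>
    intro l acc h
    cases l with
    | nil => simp [PySem.Chars.replace.go, replRec]
    | cons c t =>
      rw [PySem.Chars.replace.go]
      by_cases hp : (o :: ot).isPrefixOf (c :: t)
      · rw [if_pos hp, replRec, if_pos hp]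
        have hlen : (List.drop (o :: ot).length (c :: t)).length ≤ n := by
          simp [List.length_drop] at *
          omega
        rw [ih _ _ hlen]
        simp [List.drop_succ_cons]
      · rw [if_neg hp, replRec, if_neg hp]
        have hlen : t.length ≤ n := by simp at h; omega
        rw [ih _ _ hlen]
        simp

theorem replace_eq_replRec (o : Char) (ot new : List Char) (l : List Char) :
    PySem.Chars.replace l (o :: ot) new = replRec o ot new l := by
  rw [PySem.Chars.replace]
  simp [go_eq o ot new l.length l [] (le_refl _)]

theorem subOnce_eq_replRec (p : Char) (pt : List Char) (l : List Char) :
    subOnce p pt l = replRec p pt ['i'] l := by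
  induction l using subOnce.induct p pt with
  | case1 => simp [subOnce, replRec]
  | case2 c rest hc ih =>
    rw [subOnce, replRec, if_pos hc]
    have hp : (p :: pt).isPrefixOf (c :: rest) := by
      rw [List.isPrefixOf_iff_prefix]
      exact ⟨(c :: rest).drop (pt.length + 1), by rw [← hc]; simp⟩
    rw [if_pos hp, List.drop_succ_cons] at *
    simp [ih]
  | case3 c rest hc ih =>
    rw [subOnce, replRec, if_neg hc]
    have hp : ¬ (p :: pt).isPrefixOf (c :: rest) := by
      rw [List.isPrefixOf_iff_prefix]
      intro h
      have := List.prefix_iff_eq_take.mp h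
      simp only [List.length_cons] at this
      exact hc this.symm
    rw [if_neg hp]
    simp [ih]

theorem replRec_space_eq_filter (l : List Char) :
    replRec ' ' [] [] l = l.filter (fun c => c ≠ ' ') := by
  induction l with
  | nil => simp [replRec]
  | cons c t ih =>
    rw [replRec]
    by_cases hc : c = ' '
    · subst hc
      rw [if_pos (by simp [List.isPrefixOf])]
      simpa using ih
    · rw [if_neg (by simp [List.isPrefixOf]; exact fun h => hc h.symm)]
      simp [hc, ih]

theorem replRec_eq_self_of_not_infix (o : Char) (ot new : List Char) (l : List Char)
    (h : ¬ (o :: ot) <:+: l) : replRec o ot new l = l := by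
  induction l with
  | nil => simp [replRec]
  | cons c t ih =>
    rw [replRec]
    have hp : ¬ (o :: ot).isPrefixOf (c :: t) := by
      rw [List.isPrefixOf_iff_prefix]
      intro hpre
      exact h hpre.isInfix
    rw [if_neg hp]
    have : ¬ (o :: ot) <:+: t := fun hi => h (hi.trans (List.suffix_cons c t).isInfix)
    simp [ih this]

-- the per-symbol step of A equals the per-symbol step of B
theorem stepA_eq_stepB (sym : List Char) (lab : List Char) :
    (if PySem.Chars.isIn ('\\' :: sym) lab then PySem.Chars.replace lab ('\\' :: sym) ['i'] else lab)
      = subOnce '\\' sym lab := by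
  rw [subOnce_eq_replRec]
  by_cases hin : PySem.Chars.isIn ('\\' :: sym) lab = true
  · rw [if_pos hin, replace_eq_replRec]
  · rw [if_neg hin]
    have : ¬ ('\\' :: sym) <:+: lab := by
      rw [← PySem.Chars.isIn_iff_infix]
      simpa using hin
    rw [replRec_eq_self_of_not_infix _ _ _ _ this]

-- the '$'-condition of A equals that of B, and the peeled strings coincide
theorem cond_eq (l : List Char) :
    (PySem.List.pyGet? l 0 = some '$' ∧ PySem.List.pyGet? l (-1) = some '$')
      ↔ (l.head? = some '$' ∧ l.getLast? = some '$') := by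
  cases l with
  | nil => simp [PySem.List.pyGet?, PySem.List.pyIdx?]
  | cons c t =>
    rw [List.getLast?_eq_getElem?]
    simp [PySem.List.pyGet?, PySem.List.pyIdx?]

theorem slice_eq_drop_dropLast (l : List Char) :
    PySem.List.slice l (some 1) (some (-1)) = (l.drop 1).dropLast := by
  cases l with
  | nil => simp [PySem.List.slice, PySem.List.clampIdx]
  | cons c t =>
    simp [PySem.List.slice, PySem.List.clampIdx, List.dropLast_eq_take]
    split_ifs with h <;> omega

-- the common processing of a fully peeled label (the fold of B's passes + the strip step)
def processTex (l : List Char) (strip : Bool) : List Char :=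
  let l2 := TEX_SYMBOLS.foldl (fun cs sym => subOnce '\\' sym cs) l
  if strip then PySem.Chars.replace l2 [' '] [] else l2

theorem afterPeel_eq (l : List Char) (strip : Bool) :
    (let l2 := TEX_SYMBOLS.foldl (fun lab i =>
        if PySem.Chars.isIn ('\\' :: i) lab then PySem.Chars.replace lab ('\\' :: i) ['i'] else lab) l;
      if strip then PySem.Chars.replace l2 [' '] [] else l2) = processTex l strip := by
  simp only [processTex]
  have hfold : TEX_SYMBOLS.foldl (fun lab i =>
      if PySem.Chars.isIn ('\\' :: i) lab then PySem.Chars.replace lab ('\\' :: i) ['i'] else lab) l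
      = TEX_SYMBOLS.foldl (fun cs sym => subOnce '\\' sym cs) l := by
    congr 1
    funext lab sym
    exact stepA_eq_stepB sym lab
  rw [hfold]

-- A's recursion in terms of B's peel: the strip flag is forced to true as soon as one peel happens
theorem detexifyGo_eq (l : List Char) (strip : Bool) :
    detexifyGo l strip =
      (if peelB l = [] then []
       else processTex (peelB l)
         (if l.head? = some '$' ∧ l.getLast? = some '$' then true else strip)) := by
  induction l, strip using detexifyGo.induct with
  | case1 strip =>
    rw [detexifyGo, if_pos rfl, peelB]
    simp
  | case2 l strip hne hcond ih =>
    rw [detexifyGo, if_neg hne, if_pos hcond]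
    have hc := (cond_eq l).mp hcond
    rw [peelB, if_pos hc, ← slice_eq_drop_dropLast, if_pos hc]
    rw [ih, slice_eq_drop_dropLast]
    split_ifs <;> rfl
  | case3 l hne hcond =>
    rw [detexifyGo, if_neg hne, if_neg hcond]
    have hc : ¬ (l.head? = some '$' ∧ l.getLast? = some '$') := fun h => hcond ((cond_eq l).mpr h)
    rw [peelB, if_neg hc, if_neg hne, if_neg hc]
    exact afterPeel_eq l true
  | case4 l strip hne hcond hstrip =>
    rw [detexifyGo, if_neg hne, if_neg hcond]
    have hc : ¬ (l.head? = some '$' ∧ l.getLast? = some '$') := fun h => hcond ((cond_eq l).mpr h)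
    rw [peelB, if_neg hc, if_neg hne, if_neg hc]
    exact afterPeel_eq l strip

-- peelB of a non-peelable list is itself
theorem peelB_eq_self (l : List Char) (h : ¬ (l.head? = some '$' ∧ l.getLast? = some '$')) :
    peelB l = l := by
  rw [peelB, if_neg h]

-- subOnce produces only 'i' and characters of its input
theorem mem_subOnce (p : Char) (pt l : List Char) (c : Char) :
    c ∈ subOnce p pt l → c = 'i' ∨ c ∈ l := by
  induction l using subOnce.induct p pt with
  | case1 => intro h; simp [subOnce] at h
  | case2 d rest hc ih =>
    intro h
    rw [subOnce, if_pos hc] at h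
    rcases List.mem_cons.mp h with h | h
    · exact Or.inl h
    · rcases ih h with h' | h'
      · exact Or.inl h'
      · exact Or.inr (List.mem_of_mem_drop h')
  | case3 d rest hc ih =>
    intro h
    rw [subOnce, if_neg hc] at h
    rcases List.mem_cons.mp h with h | h
    · exact Or.inr (by simp [h])
    · rcases ih h with h' | h'
      · exact Or.inl h'
      · exact Or.inr (List.mem_cons_of_mem d h')

-- subOnce keeps every space when the pattern contains none
theorem space_mem_subOnce (p : Char) (pt l : List Char) (hpat : ' ' ∉ p :: pt) :
    ' ' ∈ l → ' ' ∈ subOnce p pt l := by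
  induction l using subOnce.induct p pt with
  | case1 => intro h; simp at h
  | case2 d rest hc ih =>
    intro h
    rw [subOnce, if_pos hc]
    have hsplit : ' ' ∈ (d :: rest).take (pt.length + 1) ∨ ' ' ∈ (d :: rest).drop (pt.length + 1) := by
      rw [← List.mem_append, List.take_append_drop]
      exact h
    rcases hsplit with h' | h'
    · rw [hc] at h'
      exact absurd h' hpat
    · exact List.mem_cons_of_mem _ (ih h')
  | case3 d rest hc ih =>
    intro h
    rw [subOnce, if_neg hc]
    rcases List.mem_cons.mp h with h | h
    · subst h; exact List.mem_cons_self
    · exact List.mem_cons_of_mem d (ih h)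

-- no TeX symbol contains a space
theorem tex_no_space : ∀ sym ∈ TEX_SYMBOLS, ' ' ∉ '\\' :: sym := by decide

-- the fold of B's passes keeps space membership both ways
theorem foldTex_space (l : List Char) :
    (' ' ∈ TEX_SYMBOLS.foldl (fun cs sym => subOnce '\\' sym cs) l ↔ ' ' ∈ l) := by
  have key : ∀ (syms : List (List Char)), (∀ sym ∈ syms, ' ' ∉ '\\' :: sym) → ∀ (l : List Char),
      (' ' ∈ syms.foldl (fun cs sym => subOnce '\\' sym cs) l ↔ ' ' ∈ l) := by
    intro syms
    induction syms with
    | nil => intro _ l; simp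
    | cons s rest ih =>
      intro hno l
      rw [List.foldl_cons]
      constructor
      · intro h
        have := (ih (fun x hx => hno x (List.mem_cons_of_mem s hx)) _).mp h
        rcases mem_subOnce '\\' s l ' ' this with h' | h'
        · exact absurd h'.symm (by decide)
        · exact h'
      · intro h
        exact (ih (fun x hx => hno x (List.mem_cons_of_mem s hx)) _).mpr
          (space_mem_subOnce '\\' s l (hno s (by simp)) h)
  exact key TEX_SYMBOLS tex_no_space l

-- peelB keeps every space (it only removes the outer '$' characters)
theorem space_mem_peelB (l : List Char) : ' ' ∈ l → ' ' ∈ peelB l := by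
  induction l using peelB.induct with
  | case1 l hc ih =>
    intro h
    rw [peelB, if_pos hc]
    apply ih
    obtain ⟨hh, hl⟩ := hc
    cases l with
    | nil => simp at hh
    | cons c t =>
      simp only [List.head?_cons, Option.some.injEq] at hh
      subst hh
      rcases List.mem_cons.mp h with heq | hmem
      · exact absurd heq (by decide)
      · have htne : t ≠ [] := List.ne_nil_of_mem hmem
        have hlast : t.getLast htne = '$' := by
          have h1 : ('$' :: t).getLast? = t.getLast? := by
            cases t with
            | nil => exact absurd rfl htne
            | cons b t' => simp [List.getLast?_cons_cons]
          have h2 : t.getLast? = some (t.getLast htne) := List.getLast?_eq_some_getLast htne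
          rw [h1, h2] at hl
          exact (Option.some.injEq _ _).mp hl
        have hsplit : ' ' ∈ t.dropLast ++ [t.getLast htne] :=
          (List.dropLast_append_getLast htne).symm ▸ hmem
        simp only [List.drop_one, List.tail_cons]
        rcases List.mem_append.mp hsplit with h' | h'
        · exact h'
        · exfalso
          simp only [List.mem_singleton] at h'
          rw [hlast] at h'
          exact absurd h' (by decide)
  | case2 l hc =>
    intro h
    rw [peelB, if_neg hc]
    exact h

-- peelB only keeps characters of its input
theorem mem_of_mem_peelB (l : List Char) (c : Char) : c ∈ peelB l → c ∈ l := by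
  induction l using peelB.induct with
  | case1 l hc ih =>
    intro h
    rw [peelB, if_pos hc] at h
    exact List.mem_of_mem_drop (List.mem_of_mem_dropLast (ih h))
  | case2 l hc =>
    intro h
    rw [peelB, if_neg hc] at h
    exact h

-- the fold of B's passes on the empty list is empty
theorem foldTex_nil : ∀ (syms : List (List Char)),
    syms.foldl (fun cs sym => subOnce '\\' sym cs) ([] : List Char) = [] := by
  intro syms
  induction syms with
  | nil => rfl
  | cons s rest ih => simpa [subOnce] using ih

-- with no space in the input, the strip flag is irrelevant
theorem processTex_no_space (m : List Char) (h : ' ' ∉ m) :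
    processTex m true = processTex m false := by
  have h2 : ' ' ∉ TEX_SYMBOLS.foldl (fun cs sym => subOnce '\\' sym cs) m :=
    fun hm => h ((foldTex_space m).mp hm)
  unfold processTex
  rw [if_pos rfl, if_neg Bool.false_ne_true, replace_eq_replRec, replRec_space_eq_filter]
  apply List.filter_eq_self.mpr
  intro a ha
  simp only [ne_eq, decide_eq_true_eq]
  intro ha'
  subst ha'
  exact h2 ha

-- the processed result with strip=true contains no space
theorem no_space_processTex_true (m : List Char) : ' ' ∉ processTex m true := by
  simp only [processTex, if_true]
  rw [replace_eq_replRec, replRec_space_eq_filter]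
  intro hm
  have := List.of_mem_filter hm
  simp at this

-- ===== VERDICT (by name: the statement is the Claim_ definition above) =====
theorem detexify_spec : Claim_unchanged_detexify := by
  intro label strip _
  unfold Spec_detexify
  intro hD
  cases label with
  | none => rfl
  | some s =>
    by_cases hs : s.toList = []
    · simp [detexify, detexify_alt, hs]
    · simp only [detexify, detexify_alt, if_neg hs]
      rw [detexifyGo_eq]
      by_cases hc : s.toList.head? = some '$' ∧ s.toList.getLast? = some '$'
      · rw [if_pos hc]
        by_cases hp : peelB s.toList = []
        · rw [if_pos hp, hp]
          rw [show (TEX_SYMBOLS.foldl (fun cs sym => subOnce '\\' sym cs) ([] : List Char)) = [] from foldTex_nil TEX_SYMBOLS]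
          cases strip
          · rfl
          · simp [replace_eq_replRec, replRec]
        · rw [if_neg hp]
          cases strip with
          | true => rfl
          | false =>
            have hns : ' ' ∉ s.toList := by
              intro hsp
              apply hD
              unfold D_detexify
              refine ⟨rfl, ?_⟩
              simp only [Option.elim]
              rw [Bool.and_eq_true, Bool.and_eq_true]
              refine ⟨⟨?_, ?_⟩, ?_⟩
              · rw [hc.1]; rfl
              · rw [hc.2]; rfl
              · simpa using hsp
            have hns2 : ' ' ∉ peelB s.toList := fun hm => hns (mem_of_mem_peelB _ _ hm)
            rw [processTex_no_space _ hns2]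
            rfl
      · rw [if_neg hc, peelB_eq_self _ hc, if_neg hs]
        rfl

set_option maxHeartbeats 1000000 in
theorem detexify_changed : Claim_changed_detexify := by
  unfold Claim_changed_detexify
  refine ⟨by decide, by decide, ?_, ?_, by decide⟩
  · show detexify (some "$ a$") false = "a"
    simp [detexify, detexifyGo, TEX_SYMBOLS, PySem.Chars.isIn, PySem.Chars.replace, PySem.Chars.replace.go, PySem.List.pyGet?, PySem.List.pyIdx?, PySem.List.slice, PySem.List.clampIdx, String.ofList]
    rfl
  · show detexify_alt (some "$ a$") false = " a"
    simp [detexify_alt, peelB, subOnce, TEX_SYMBOLS, String.ofList]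
    rfl

theorem detexify_tight : Claim_exact_detexify := by
  intro label strip _ hD
  obtain ⟨hstrip, hb⟩ := hD
  cases label with
  | none => simp [Option.elim] at hb
  | some s =>
    simp only [Option.elim] at hb
    rw [Bool.and_eq_true, Bool.and_eq_true] at hb
    obtain ⟨⟨hh, hl⟩, hsp⟩ := hb
    have hh' : s.toList.head? = some '$' := eq_of_beq hh
    have hl' : s.toList.getLast? = some '$' := eq_of_beq hl
    have hsp' : ' ' ∈ s.toList := by simpa using hsp
    have hs : s.toList ≠ [] := by
      intro h; rw [h] at hh'; simp at hh'
    have hpm : ' ' ∈ peelB s.toList := space_mem_peelB _ hsp'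
    have hp : peelB s.toList ≠ [] := List.ne_nil_of_mem hpm
    subst hstrip
    simp only [detexify, detexify_alt, if_neg hs]
    rw [detexifyGo_eq, if_neg hp, if_pos (show _ ∧ _ from ⟨hh', hl'⟩)]
    intro heq
    have hlists : processTex (peelB s.toList) true
        = (if (false : Bool) then PySem.Chars.replace (TEX_SYMBOLS.foldl (fun cs sym => subOnce '\\' sym cs) (peelB s.toList)) [' '] [] else TEX_SYMBOLS.foldl (fun cs sym => subOnce '\\' sym cs) (peelB s.toList)) := by
      have h2 := congrArg String.toList heq
      simpa using h2
    have hB : ' ' ∈ processTex (peelB s.toList) true := by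
      rw [hlists, if_neg Bool.false_ne_true]
      exact (foldTex_space _).mpr hpm
    exact no_space_processTex_true _ hB
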